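-- pv_equiv track=rewrite | github.com/CheungBH/Alpha_Processor | data_process/process_json.py | drop_scores
-- ===== SOURCE A (Python) =====
-- def drop_scores(data_list):
--     new_list = []
--     for index, value in enumerate(data_list):
--         if (index + 1) % 3 == 0:
--             continue
--         else:
--             new_list.append(value)
--     return new_list
-- ===== SOURCE B (Python) =====
-- def drop_scores(data_list):
--     data = list(data_list)
--     out = []
--     for i in range(0, len(data), 3):
--         out.extend(data[i:i+2])
--     return out
-- ===== Notes on version B (the rewrite author's own statement) =====
-- stated objective: alternative
-- what changed: B walks the list in consecutive blocks of three and keeps each block's first two elements via slicing, instead of A's per-element enumerate loop testing (index+1) % 3.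
import Mathlib
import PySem

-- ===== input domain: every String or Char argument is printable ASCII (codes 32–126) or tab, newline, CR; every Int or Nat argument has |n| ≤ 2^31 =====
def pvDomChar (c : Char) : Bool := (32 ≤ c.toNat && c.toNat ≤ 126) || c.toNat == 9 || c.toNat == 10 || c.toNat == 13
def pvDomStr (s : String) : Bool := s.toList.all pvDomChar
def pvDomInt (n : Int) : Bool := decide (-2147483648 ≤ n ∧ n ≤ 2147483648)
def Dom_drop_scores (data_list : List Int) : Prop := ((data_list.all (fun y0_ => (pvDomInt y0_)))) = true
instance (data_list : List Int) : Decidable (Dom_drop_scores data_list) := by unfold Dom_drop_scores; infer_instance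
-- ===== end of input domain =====

-- B keeps each consecutive block of three minus its third element, instead of A's per-index modulus test.

-- ===== PORT A =====
-- literal: new_list = []; for index, value in enumerate(data_list): skip when (index+1)%3==0 else append
def drop_scores (data_list : List Int) : List Int :=
  (PySem.List.enumerate data_list).foldl
    (fun new_list iv => if (iv.1 + 1) % 3 = 0 then new_list else new_list ++ [iv.2]) []

-- ===== PORT B =====
-- literal: walk the list three at a time, keeping the first two of each block (data[i:i+2]);
-- a trailing block of one or two elements is kept wholesale.
def drop_scores_alt : List Int → List Int
  | [] => []
  | [a] => [a]
  | [a, b] => [a, b]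
  | a :: b :: _ :: rest => a :: b :: drop_scores_alt rest

-- ===== PRECONDITION & SPEC =====
def Spec_drop_scores (data_list : List Int) (out : List Int) : Prop := out = drop_scores_alt data_list
instance (data_list : List Int) (out : List Int) : Decidable (Spec_drop_scores data_list out) := by unfold Spec_drop_scores; infer_instance

-- ===== CLAIM (what is proved, stated in full; the proofs are below) =====
def Claim_equal_drop_scores : Prop := ∀ (data_list : List Int), Dom_drop_scores data_list → Spec_drop_scores data_list (drop_scores data_list)

-- ===== LEMMAS AND PROOFS =====

-- cons-form of A's loop, indexed from s
def dropGo (s : Int) : List Int → List Int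
  | [] => []
  | v :: rest => if (s + 1) % 3 = 0 then dropGo (s + 1) rest else v :: dropGo (s + 1) rest

theorem foldl_drop_eq_go (xs : List Int) : ∀ (s : Int) (acc : List Int),
    (PySem.List.enumerate xs s).foldl
      (fun new_list iv => if (iv.1 + 1) % 3 = 0 then new_list else new_list ++ [iv.2]) acc
      = acc ++ dropGo s xs := by
  induction xs with
  | nil => intro s acc; simp [PySem.List.enumerate_nil, dropGo]
  | cons v rest ih =>
    intro s acc
    simp only [PySem.List.enumerate_cons, List.foldl_cons, dropGo]
    by_cases h : (s + 1) % 3 = 0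
    · rw [if_pos h, if_pos h, ih]
    · rw [if_neg h, if_neg h, ih]; simp

theorem dropGo_period (xs : List Int) : ∀ s : Int, dropGo (s + 3) xs = dropGo s xs := by
  induction xs with
  | nil => intro s; simp [dropGo]
  | cons v rest ih =>
    intro s
    have h4 : s + 3 + 1 = (s + 1) + 3 := by ring
    have h3 : (s + 1 + 3) % 3 = (s + 1) % 3 := by omega
    simp only [dropGo, h4, h3, ih (s + 1)]

theorem dropGo_zero_eq_alt (xs : List Int) : dropGo 0 xs = drop_scores_alt xs := by
  induction xs using drop_scores_alt.induct with
  | case1 => rfl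
  | case2 a => rw [dropGo, if_neg (by decide), dropGo]; rfl
  | case3 a b => rw [dropGo, if_neg (by decide), dropGo, if_neg (by decide), dropGo]; rfl
  | case4 a b c rest ih =>
    rw [dropGo, if_neg (by decide), dropGo, if_neg (by decide), dropGo, if_pos (by decide)]
    have hrest : dropGo (0 + 1 + 1 + 1 : Int) rest = drop_scores_alt rest := by
      rw [show (0 + 1 + 1 + 1 : Int) = 0 + 3 by norm_num, dropGo_period, ih]
    rw [hrest]; rfl

-- ===== VERDICT (by name: the statement is the Claim_ definition above) =====
theorem drop_scores_spec : Claim_equal_drop_scores := by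
  intro data_list _
  unfold Spec_drop_scores drop_scores
  rw [show (PySem.List.enumerate data_list) = PySem.List.enumerate data_list 0 from rfl,
      foldl_drop_eq_go, dropGo_zero_eq_alt]
  simp
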